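-- pv_equiv track=rewrite | github.com/pkkalive/DSA | Arrays/MultipleLeftRotations.py | multiple_left_rotations
-- ===== SOURCE A (Python) =====
-- def multiple_left_rotations(arr, key):
--     n = len(arr)
--     k = key % n
--     res = []
--     for i in range(k, n):
--         res.append(arr[i])
--     for i in range(k):
--         res.append(arr[i])
--     return res
-- ===== SOURCE B (Python) =====
-- def multiple_left_rotations(arr, key):
--     n = len(arr)
--     k = key % n  # raises ZeroDivisionError on empty arr, like A
--     res = list(arr)
--
--     def rev(lo, hi):  # reverse res[lo:hi] in place with two pointers
--         i, j = lo, hi - 1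
--         while i < j:
--             res[i], res[j] = res[j], res[i]
--             i += 1
--             j -= 1
--
--     rev(0, k)
--     rev(k, n)
--     rev(0, n)
--     return res
-- ===== Notes on version B (the rewrite author's own statement) =====
-- stated objective: alternative
-- what changed: Replaces A's two index-copy loops (tail segment then head segment appended into a fresh list) by the classic three-reversal rotation done in place on a copy with explicit two-pointer swaps.
import Mathlib
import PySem

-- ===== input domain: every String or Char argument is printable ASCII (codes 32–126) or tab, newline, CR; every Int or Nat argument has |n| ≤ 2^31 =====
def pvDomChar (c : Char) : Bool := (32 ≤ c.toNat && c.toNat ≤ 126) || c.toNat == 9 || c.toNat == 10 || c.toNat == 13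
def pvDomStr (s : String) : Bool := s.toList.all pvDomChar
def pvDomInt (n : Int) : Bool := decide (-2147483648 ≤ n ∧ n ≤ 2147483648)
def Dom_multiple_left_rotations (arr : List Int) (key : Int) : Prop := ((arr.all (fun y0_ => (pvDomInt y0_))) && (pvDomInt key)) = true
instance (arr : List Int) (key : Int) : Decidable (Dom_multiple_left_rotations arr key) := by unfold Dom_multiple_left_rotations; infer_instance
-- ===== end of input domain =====

-- B replaces A's two index-copy loops by the three-reversal rotation done with two-pointer
-- swaps on a copy (objective: alternative algorithm, same O(n) cost; return value only, neither mutates its input in Lean).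

-- ===== PORT A =====
-- literal port of A: n = len(arr); k = key % n; append arr[i] for i in range(k,n) then range(k)
-- (indices are provably in range under Pre_, so pyGetD's default is never used)
def multiple_left_rotations (arr : List Int) (key : Int) : List Int :=
  let n : Int := PySem.List.len arr
  let k : Int := PySem.Int.mod key n
  let res : List Int := (PySem.List.pyRange k n).foldl (fun r i => r ++ [PySem.List.pyGetD arr i 0]) []
  (PySem.List.pyRange 0 k).foldl (fun r i => r ++ [PySem.List.pyGetD arr i 0]) res

-- ===== PORT B =====
-- the two-pointer while loop of Source B's rev: swap res[i] and res[j], move the pointers inward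
def pvRevSeg (res : List Int) (i j : Nat) : List Int :=
  if h : i < j then
    pvRevSeg ((res.set i (res.getD j 0)).set j (res.getD i 0)) (i + 1) (j - 1)
  else res
termination_by j - i
decreasing_by omega

-- rev(lo, hi): starts with j = hi - 1 (Nat subtraction agrees with Python: for hi = 0 the loop body never runs)
def pvRev (res : List Int) (lo hi : Nat) : List Int := pvRevSeg res lo (hi - 1)

def multiple_left_rotations_alt (arr : List Int) (key : Int) : List Int :=
  let n : Nat := arr.length
  -- key % n is nonnegative for n > 0 (Pre_), so .toNat is exact
  let k : Nat := (PySem.Int.mod key (PySem.List.len arr)).toNat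
  let res := arr                 -- the copy list(arr)
  let res := pvRev res 0 k
  let res := pvRev res k n
  pvRev res 0 n

-- ===== PRECONDITION & SPEC =====
-- A raises ZeroDivisionError on the empty list (key % 0); B raises there too.
def Pre_multiple_left_rotations (arr : List Int) (key : Int) : Prop := arr ≠ []
instance (arr : List Int) (key : Int) : Decidable (Pre_multiple_left_rotations arr key) := by unfold Pre_multiple_left_rotations; infer_instance

def pvWitness_multiple_left_rotations : List Int × Int := ([1, 2, 3, 4], 2)

def Spec_multiple_left_rotations (arr : List Int) (key : Int) (out : List Int) : Prop := out = multiple_left_rotations_alt arr key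
instance (arr : List Int) (key : Int) (out : List Int) : Decidable (Spec_multiple_left_rotations arr key out) := by unfold Spec_multiple_left_rotations; infer_instance

-- ===== CLAIM (what is proved, stated in full; the proofs are below) =====
def Claim_equal_multiple_left_rotations : Prop := ∀ (arr : List Int) (key : Int), Dom_multiple_left_rotations arr key → Pre_multiple_left_rotations arr key → Spec_multiple_left_rotations arr key (multiple_left_rotations arr key)

-- ===== LEMMAS AND PROOFS =====

lemma pvRevSeg_length (res : List Int) (i j : Nat) : (pvRevSeg res i j).length = res.length := by
  fun_induction pvRevSeg res i j <;> simp_all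

lemma getD_set_swap (xs : List Int) (i j q : Nat) (hi : i < xs.length) (hj : j < xs.length) :
    ((xs.set i (xs.getD j 0)).set j (xs.getD i 0)).getD q 0 =
      if q = j then xs.getD i 0 else if q = i then xs.getD j 0 else xs.getD q 0 := by
  rw [List.getD_eq_getElem?_getD, List.getElem?_set, List.length_set]
  by_cases h1 : q = j
  · rw [if_pos h1.symm, if_pos hj, if_pos h1]
    rfl
  · rw [if_neg (fun h => h1 h.symm), if_neg h1, List.getElem?_set]
    by_cases h2 : q = i
    · rw [if_pos h2.symm, if_pos hi, if_pos h2]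
      rfl
    · rw [if_neg (fun h => h2 h.symm), if_neg h2, List.getD_eq_getElem?_getD]

lemma pvRevSeg_getD (res : List Int) (i j : Nat) (hj : j < res.length) :
    ∀ p, p < res.length →
      (pvRevSeg res i j).getD p 0 =
        if p < i ∨ j < p then res.getD p 0 else res.getD (i + j - p) 0 := by
  fun_induction pvRevSeg res i j with
  | case1 xs i j h ih =>
    intro p hp
    have hi : i < xs.length := by omega
    have hlen : ((xs.set i (xs.getD j 0)).set j (xs.getD i 0)).length = xs.length := by simp
    have hj' : j - 1 < ((xs.set i (xs.getD j 0)).set j (xs.getD i 0)).length := by omega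
    rw [ih hj' p (by omega)]
    split_ifs with h1 h2 h2
    · -- p < i+1 ∨ j-1 < p, and p < i ∨ j < p
      rw [getD_set_swap xs i j p hi hj]
      split_ifs <;> first | rfl | omega
    · -- p < i+1 ∨ j-1 < p, but i ≤ p ≤ j : p = i or p = j
      rw [getD_set_swap xs i j p hi hj]
      split_ifs with e1 e2
      · congr 1; omega
      · congr 1; omega
      · omega
    · omega
    · -- i+1 ≤ p ≤ j-1, inner element untouched
      rw [getD_set_swap xs i j (i + 1 + (j - 1) - p) hi hj]
      split_ifs with e1 e2
      · omega
      · omega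
      · congr 1; omega
  | case2 xs i j h =>
    intro p hp
    split_ifs with h1
    · rfl
    · congr 1; omega

-- closed form of each side on index p (for arr ≠ [], k = (key % len).toNat)
lemma rot_getD (arr : List Int) (k p : Nat) (hk : k < arr.length) (hp : p < arr.length) :
    (arr.drop k ++ arr.take k).getD p 0 =
      if p < arr.length - k then arr.getD (k + p) 0 else arr.getD (p - (arr.length - k)) 0 := by
  simp only [List.getD_eq_getElem?_getD, List.getElem?_append, List.length_drop,
    List.getElem?_drop, List.getElem?_take]
  split_ifs with h1 <;> first | rfl | omega

lemma alt_getD (arr : List Int) (key : Int) (hne : arr ≠ []) (p : Nat) (hp : p < arr.length) :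
    (multiple_left_rotations_alt arr key).getD p 0 =
      if p < arr.length - (PySem.Int.mod key (PySem.List.len arr)).toNat then
        arr.getD ((PySem.Int.mod key (PySem.List.len arr)).toNat + p) 0
      else arr.getD (p - (arr.length - (PySem.Int.mod key (PySem.List.len arr)).toNat)) 0 := by
  have hlen : (0 : Int) < PySem.List.len arr := by
    simp [PySem.List.len]; exact List.length_pos_iff.mpr hne
  set n := arr.length with hn
  have hnpos : 0 < n := List.length_pos_iff.mpr hne
  set k := (PySem.Int.mod key (PySem.List.len arr)).toNat with hkdef
  have hkint : PySem.Int.mod key (PySem.List.len arr) = key % (n : Int) := by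
    rw [PySem.Int.mod_eq_emod_of_pos hlen]; simp [PySem.List.len, hn]
  have hk : k < n := by
    have h1 : key % (n : Int) < (n : Int) := Int.emod_lt_of_pos key (by exact_mod_cast hnpos)
    have h0 : 0 ≤ key % (n : Int) := Int.emod_nonneg key (by exact_mod_cast hnpos.ne')
    omega
  unfold multiple_left_rotations_alt pvRev
  rw [← hkdef, ← hn]
  set f1 := pvRevSeg arr 0 (k - 1) with hf1
  set f2 := pvRevSeg f1 k (n - 1) with hf2
  have L1 : f1.length = n := by rw [hf1, pvRevSeg_length]
  have L2 : f2.length = n := by rw [hf2, pvRevSeg_length, L1]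
  have e1 : ∀ q, q < n → f1.getD q 0 = if q < 0 ∨ k - 1 < q then arr.getD q 0 else arr.getD (0 + (k - 1) - q) 0 := by
    intro q hq; rw [hf1]; exact pvRevSeg_getD arr 0 (k - 1) (by omega) q (by omega)
  have e2 : ∀ q, q < n → f2.getD q 0 = if q < k ∨ n - 1 < q then f1.getD q 0 else f1.getD (k + (n - 1) - q) 0 := by
    intro q hq; rw [hf2]; exact pvRevSeg_getD f1 k (n - 1) (by omega) q (by omega)
  rw [pvRevSeg_getD f2 0 (n - 1) (by omega) p (by omega)]
  rw [if_neg (show ¬(p < 0 ∨ n - 1 < p) by omega)]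
  rw [e2 (0 + (n - 1) - p) (by omega)]
  by_cases h5 : 0 + (n - 1) - p < k ∨ n - 1 < 0 + (n - 1) - p
  · -- take part: the outer-reversed index lands in the (reversed) first k slots
    rw [if_pos h5, e1 (0 + (n - 1) - p) (by omega)]
    rw [if_neg (show ¬(0 + (n - 1) - p < 0 ∨ k - 1 < 0 + (n - 1) - p) by omega)]
    rw [if_neg (show ¬ p < n - k by omega)]
    congr 1; omega
  · -- drop part
    rw [if_neg h5, e1 (k + (n - 1) - (0 + (n - 1) - p)) (by omega)]
    rw [if_pos (show p < n - k by omega)]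
    by_cases h6 : k + (n - 1) - (0 + (n - 1) - p) < 0 ∨ k - 1 < k + (n - 1) - (0 + (n - 1) - p)
    · rw [if_pos h6]; congr 1; omega
    · -- only when k = 0 and p = 0; both sides are arr.getD 0
      rw [if_neg h6]; congr 1; omega

lemma a_eq_rot (arr : List Int) (key : Int) (hne : arr ≠ []) :
    multiple_left_rotations arr key =
      arr.drop (PySem.Int.mod key (PySem.List.len arr)).toNat ++
        arr.take (PySem.Int.mod key (PySem.List.len arr)).toNat := by
  have hlen : (0 : Int) < PySem.List.len arr := by
    simp [PySem.List.len]; exact List.length_pos_iff.mpr hne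
  have h0 : 0 ≤ PySem.Int.mod key (PySem.List.len arr) := by
    rw [PySem.Int.mod_eq_emod_of_pos hlen]
    exact Int.emod_nonneg key (by omega)
  have hklt : PySem.Int.mod key (PySem.List.len arr) < PySem.List.len arr := by
    rw [PySem.Int.mod_eq_emod_of_pos hlen]
    exact Int.emod_lt_of_pos key hlen
  set kI := PySem.Int.mod key (PySem.List.len arr) with hkI
  have hdef : multiple_left_rotations arr key =
      (PySem.List.pyRange 0 kI).foldl (fun r i => r ++ [PySem.List.pyGetD arr i 0])
        ((PySem.List.pyRange kI (PySem.List.len arr)).foldl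
          (fun r i => r ++ [PySem.List.pyGetD arr i 0]) []) := rfl
  rw [hdef]
  rw [PySem.List.foldl_pyRange_pyGetD arr 0 (fun r x => r ++ [x]) [] h0]
  rw [show (fun (r : List Int) (x : Int) => r ++ [x]) = fun r x => r ++ [id x] from rfl]
  rw [PySem.List.foldl_append_singleton_eq_map id, List.map_id]
  rw [PySem.List.pyRange_one, List.foldl_map]
  have hstep : ∀ (r : List Int) (t : Nat),
      r ++ [PySem.List.pyGetD arr ((0 : Int) + (t : Int)) 0] = r ++ [arr.getD t 0] := by
    intro r t; rw [zero_add, PySem.List.pyGetD_natCast]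
  simp only [hstep]
  rw [PySem.List.foldl_append_singleton_eq_map (fun t => arr.getD t 0)]
  rw [show (kI - 0).toNat = kI.toNat by omega]
  -- (range kI.toNat).map (arr.getD · 0) = arr.take kI.toNat
  have hkn : kI.toNat ≤ arr.length := by
    rw [PySem.List.len_eq] at hklt; omega
  refine congrArg (fun z => arr.drop kI.toNat ++ z) ?_
  apply List.ext_getElem
  · simp; omega
  · intro p h1 h2
    simp only [List.getElem_map, List.getElem_range, List.getElem_take]
    have hp : p < arr.length := by simp at h1; omega
    exact List.getD_eq_getElem arr 0 hp

-- ===== VERDICT (by name: the statement is the Claim_ definition above) =====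
theorem multiple_left_rotations_spec : Claim_equal_multiple_left_rotations := by
  intro arr key _ hne
  unfold Spec_multiple_left_rotations
  rw [a_eq_rot arr key hne]
  have hlen : (0 : Int) < PySem.List.len arr := by
    simp [PySem.List.len]; exact List.length_pos_iff.mpr hne
  have h0 : 0 ≤ PySem.Int.mod key (PySem.List.len arr) := by
    rw [PySem.Int.mod_eq_emod_of_pos hlen]; exact Int.emod_nonneg key (by omega)
  have hklt : PySem.Int.mod key (PySem.List.len arr) < PySem.List.len arr := by
    rw [PySem.Int.mod_eq_emod_of_pos hlen]; exact Int.emod_lt_of_pos key hlen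
  set k := (PySem.Int.mod key (PySem.List.len arr)).toNat with hk
  have hkn : k < arr.length := by
    rw [hk]; rw [PySem.List.len_eq] at hklt h0 ⊢; omega
  have hlalt : (multiple_left_rotations_alt arr key).length = arr.length := by
    unfold multiple_left_rotations_alt pvRev
    simp [pvRevSeg_length]
  apply List.ext_getElem
  · simp [hlalt]; omega
  · intro p h1 h2
    have hp : p < arr.length := by omega
    have := alt_getD arr key hne p hp
    rw [← hk] at this
    have hrot := rot_getD arr k p hkn hp
    have lhs_eq : (arr.drop k ++ arr.take k)[p] = (arr.drop k ++ arr.take k).getD p 0 :=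
      (List.getD_eq_getElem _ 0 h1).symm
    have rhs_eq : (multiple_left_rotations_alt arr key)[p] = (multiple_left_rotations_alt arr key).getD p 0 :=
      (List.getD_eq_getElem _ 0 h2).symm
    rw [lhs_eq, rhs_eq, hrot, this]
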